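-- pv_equiv track=rewrite | github.com/rafael5/m-standard | src/m_standard/tools/extract_ydb.py | _read_rst_grid_table
-- ===== SOURCE A (Python) =====
-- def _read_rst_grid_table(lines: list[str], start: int) -> list[list[str]]:
--     """Parse one RST grid table beginning at or after ``start``.
--
--     Skips blank lines, finds the first ``+---`` rule, and reads
--     consecutive content lines (those starting with ``|``) until a rule
--     that's followed by a non-rule line. Returns a list of rows; each
--     row is a list of cell texts (one per pipe-delimited column).
--     """
--     i = start
--     while i < len(lines) and lines[i].strip() == "":
--         i += 1
--     if i >= len(lines) or not lines[i].lstrip().startswith("+"):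
--         return []
--
--     rows: list[list[str]] = []
--     current: list[str] | None = None
--     while i < len(lines):
--         line = lines[i]
--         stripped = line.strip()
--         if stripped.startswith("+"):
--             if current is not None:
--                 rows.append([c.strip() for c in current])
--                 current = None
--             # Continue past rules; bail when we leave the table.
--             if i + 1 >= len(lines) or not lines[i + 1].lstrip().startswith("|"):
--                 break
--         elif stripped.startswith("|"):
--             cells = [c for c in stripped.strip("|").split("|")]
--             if current is None:
--                 current = list(cells)
--             else:
--                 # Multi-line cell continuation: append to existing cells.
--                 for j in range(min(len(current), len(cells))):
--                     current[j] = (current[j] + " " + cells[j]).strip()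
--         else:
--             break
--         i += 1
--     return rows
-- ===== SOURCE B (Python) =====
-- def _read_rst_grid_table(lines: list[str], start: int) -> list[list[str]]:
--     """Parse one RST grid table: scan rule-delimited runs of cell lines,
--     emitting a row only for runs closed by a rule, merging continuation
--     lines column-wise with zip."""
--     n = len(lines)
--     i = start
--     while i < n and lines[i].strip() == "":
--         i += 1
--     if i >= n or not lines[i].lstrip().startswith("+"):
--         return []
--     rows: list[list[str]] = []
--     while True:
--         # at a rule line i: the table continues only if a cell line follows
--         if i + 1 >= n or not lines[i + 1].lstrip().startswith("|"):
--             return rows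
--         group = [lines[i + 1].strip()]
--         j = i + 2
--         while j < n and lines[j].strip().startswith("|"):
--             group.append(lines[j].strip())
--             j += 1
--         if j >= n or not lines[j].strip().startswith("+"):
--             # run of cell lines not closed by a rule: discard it and stop
--             return rows
--         first, *rest = group
--         row = first.strip("|").split("|")
--         for s in rest:
--             cells = s.strip("|").split("|")
--             row = [(a + " " + b).strip() for a, b in zip(row, cells)] + row[len(cells):]
--         rows.append([c.strip() for c in row])
--         i = j
-- ===== Notes on version B (the rewrite author's own statement) =====
-- stated objective: alternative
-- what changed: A is a single flat scan with a nullable 'current' row flushed on rule lines and an in-place index for-loop merging continuation cells; B scans the table as rule-delimited runs (a nested loop collecting each run of cell lines, emitting a row only when the run is closed by a rule) and merges each run's lines functionally with zip instead of index assignment.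
import Mathlib
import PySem

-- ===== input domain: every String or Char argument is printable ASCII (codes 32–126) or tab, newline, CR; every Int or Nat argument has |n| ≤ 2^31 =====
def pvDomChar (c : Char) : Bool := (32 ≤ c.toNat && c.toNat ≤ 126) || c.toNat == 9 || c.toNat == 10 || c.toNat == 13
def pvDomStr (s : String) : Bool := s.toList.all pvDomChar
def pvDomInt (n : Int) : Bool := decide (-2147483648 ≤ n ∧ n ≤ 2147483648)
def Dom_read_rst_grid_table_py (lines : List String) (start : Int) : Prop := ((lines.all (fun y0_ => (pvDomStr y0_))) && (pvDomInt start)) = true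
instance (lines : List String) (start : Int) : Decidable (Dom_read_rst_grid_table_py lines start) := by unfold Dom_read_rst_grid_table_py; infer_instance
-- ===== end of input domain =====

-- B re-decomposes A's flat flush-on-rule scan into a nested scan over
-- rule-delimited runs of cell lines, merging each run functionally with zipWith
-- (objective: alternative decomposition, same cost).

-- line i of `lines` as a char list (Python lines[i]; negative indices wrap; "" outside range, unreachable under Pre_)
def pvLine (lines : List String) (i : Int) : List Char := ((PySem.List.pyGet? lines i).getD "").toList

-- ===== PORT A =====
-- while i < len(lines) and lines[i].strip() == "": i += 1
def pvA_skip (lines : List String) (i : Int) : Int :=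
  if _h : i < (lines.length : Int) then
    if PySem.Chars.strip (pvLine lines i) = [] then pvA_skip lines (i + 1) else i
  else i
termination_by ((lines.length : Int) - i).toNat
decreasing_by omega

-- cells = [c for c in stripped.strip("|").split("|")]
def pvA_cells (s : List Char) : List (List Char) :=
  PySem.Chars.splitOn (PySem.Chars.stripChars s ['|']) ['|']

-- for j in range(min(len(current), len(cells))): current[j] = (current[j] + " " + cells[j]).strip()
def pvA_mergeFor (cur : List (List Char)) (cells : List (List Char)) (j : Nat) : List (List Char) :=
  if _h : j < min cur.length cells.length then
    pvA_mergeFor (cur.set j (PySem.Chars.strip ((cur.getD j []) ++ [' '] ++ (cells.getD j [])))) cells (j + 1)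
  else cur
termination_by min cur.length cells.length - j
decreasing_by simp only [List.length_set]; omega

-- the main while loop of A: flat scan carrying rows and the nullable current row
def pvA_loop (lines : List String) (i : Int) (rows : List (List String))
    (current : Option (List (List Char))) : List (List String) :=
  if _h : i < (lines.length : Int) then
    if PySem.Chars.startswith (PySem.Chars.strip (pvLine lines i)) ['+'] then
      let rows' := match current with
        | some cur => rows ++ [cur.map (fun c => String.ofList (PySem.Chars.strip c))]
        | none => rows
      if (lines.length : Int) ≤ i + 1 ∨
          ¬ PySem.Chars.startswith (PySem.Chars.lstrip (pvLine lines (i + 1))) ['|'] = true then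
        rows'
      else pvA_loop lines (i + 1) rows' none
    else if PySem.Chars.startswith (PySem.Chars.strip (pvLine lines i)) ['|'] then
      match current with
      | none => pvA_loop lines (i + 1) rows (some (pvA_cells (PySem.Chars.strip (pvLine lines i))))
      | some cur =>
          pvA_loop lines (i + 1) rows (some (pvA_mergeFor cur (pvA_cells (PySem.Chars.strip (pvLine lines i))) 0))
    else rows
  else rows
termination_by ((lines.length : Int) - i).toNat
decreasing_by all_goals omega

def read_rst_grid_table_py (lines : List String) (start : Int) : List (List String) :=
  let i := pvA_skip lines start
  if (lines.length : Int) ≤ i ∨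
      ¬ PySem.Chars.startswith (PySem.Chars.lstrip (pvLine lines i)) ['+'] = true then []
  else pvA_loop lines i [] none

-- ===== PORT B =====
def pvB_skip (lines : List String) (i : Int) : Int :=
  if _h : i < (lines.length : Int) then
    if PySem.Chars.strip (pvLine lines i) = [] then pvB_skip lines (i + 1) else i
  else i
termination_by ((lines.length : Int) - i).toNat
decreasing_by omega

-- while j < n and lines[j].strip().startswith("|"): group.append(lines[j].strip()); j += 1
def pvB_run (lines : List String) (j : Int) (acc : List (List Char)) : List (List Char) × Int :=
  if _h : j < (lines.length : Int) then
    if PySem.Chars.startswith (PySem.Chars.strip (pvLine lines j)) ['|'] then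
      pvB_run lines (j + 1) (acc ++ [PySem.Chars.strip (pvLine lines j)])
    else (acc, j)
  else (acc, j)
termination_by ((lines.length : Int) - j).toNat
decreasing_by omega

def pvB_cells (s : List Char) : List (List Char) :=
  PySem.Chars.splitOn (PySem.Chars.stripChars s ['|']) ['|']

-- row = [(a + " " + b).strip() for a, b in zip(row, cells)] + row[len(cells):]
def pvB_mergeRow (row cells : List (List Char)) : List (List Char) :=
  (List.zipWith (fun a b => PySem.Chars.strip (a ++ [' '] ++ b)) row cells) ++ row.drop cells.length

-- first, *rest = group; seed from first, fold the continuations, strip the final cells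
def pvB_rowOf (first : List Char) (rest : List (List Char)) : List String :=
  ((rest.foldl (fun row s => pvB_mergeRow row (pvB_cells s)) (pvB_cells first)).map
    (fun c => String.ofList (PySem.Chars.strip c)))

-- the `while True` loop of B, entered at a rule line i
def pvB_runs (lines : List String) (i : Int) (rows : List (List String)) : List (List String) :=
  if (lines.length : Int) ≤ i + 1 ∨
      ¬ PySem.Chars.startswith (PySem.Chars.lstrip (pvLine lines (i + 1))) ['|'] = true then rows
  else
    let gk := pvB_run lines (i + 2) []
    -- first conjunct is a totality guard only: pvB_run never moves backwards, so it always holds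
    if _h2 : i + 2 ≤ gk.2 ∧ gk.2 < (lines.length : Int) ∧
        PySem.Chars.startswith (PySem.Chars.strip (pvLine lines gk.2)) ['+'] = true then
      pvB_runs lines gk.2 (rows ++ [pvB_rowOf (PySem.Chars.strip (pvLine lines (i + 1))) gk.1])
    else rows
termination_by ((lines.length : Int) - i).toNat
decreasing_by simp only [gk] at _h2; omega

def read_rst_grid_table_py_alt (lines : List String) (start : Int) : List (List String) :=
  let i := pvB_skip lines start
  if (lines.length : Int) ≤ i ∨
      ¬ PySem.Chars.startswith (PySem.Chars.lstrip (pvLine lines i)) ['+'] = true then []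
  else pvB_runs lines i []

-- ===== PRECONDITION & SPEC =====
-- Pre_ excludes only starts below -len(lines), where Python A raises IndexError at its first lines[i].
def Pre_read_rst_grid_table_py (lines : List String) (start : Int) : Prop :=
  -(lines.length : Int) ≤ start
instance (lines : List String) (start : Int) : Decidable (Pre_read_rst_grid_table_py lines start) := by
  unfold Pre_read_rst_grid_table_py; infer_instance

def pvWitness_read_rst_grid_table_py : List String × Int := (["+--+", "| a|", "+--+"], 0)

def Spec_read_rst_grid_table_py (lines : List String) (start : Int) (out : List (List String)) : Prop := out = read_rst_grid_table_py_alt lines start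
instance (lines : List String) (start : Int) (out : List (List String)) : Decidable (Spec_read_rst_grid_table_py lines start out) := by unfold Spec_read_rst_grid_table_py; infer_instance

-- ===== CLAIM (what is proved, stated in full; the proofs are below) =====
def Claim_equal_read_rst_grid_table_py : Prop := ∀ (lines : List String) (start : Int), Dom_read_rst_grid_table_py lines start → Pre_read_rst_grid_table_py lines start → Spec_read_rst_grid_table_py lines start (read_rst_grid_table_py lines start)

-- ===== LEMMAS AND PROOFS =====

-- startswith on a single char is a head test
theorem pv_startswith_single (s : List Char) (c : Char) :
    PySem.Chars.startswith s [c] = true ↔ ∃ t, s = c :: t := by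
  cases s with
  | nil => simp [PySem.Chars.startswith, List.isPrefixOf]
  | cons a t =>
      simp [PySem.Chars.startswith, List.isPrefixOf]
      exact eq_comm

-- rstrip keeps a non-space head
theorem pv_rstrip_cons_of_not_ws (a : Char) (t : List Char) (h : PySem.Chars.isspace a = false) :
    PySem.Chars.rstrip (a :: t) = a :: PySem.Chars.rstrip t := by
  simp [PySem.Chars.rstrip, List.dropWhile_append, h]

-- strip and lstrip begin with the same character
theorem pv_startswith_strip_eq_lstrip (s : List Char) (c : Char) :
    PySem.Chars.startswith (PySem.Chars.strip s) [c]
      = PySem.Chars.startswith (PySem.Chars.lstrip s) [c] := by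
  have hstrip : PySem.Chars.strip s = PySem.Chars.rstrip (PySem.Chars.lstrip s) := rfl
  rw [hstrip]
  cases hls : PySem.Chars.lstrip s with
  | nil => simp [PySem.Chars.rstrip]
  | cons a t =>
      have ha : PySem.Chars.isspace a = false := by
        have h2 : (List.dropWhile PySem.Chars.isspace s).head? = some a := by
          rw [show List.dropWhile PySem.Chars.isspace s = a :: t from hls]; rfl
        have h3 := List.head?_dropWhile_not PySem.Chars.isspace s
        rw [h2] at h3; simpa using h3
      rw [pv_rstrip_cons_of_not_ws a t ha]
      simp [PySem.Chars.startswith, List.isPrefixOf]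

-- a string cannot start with both '|' and '+'
theorem pv_clash (s : List Char) (h : PySem.Chars.startswith s ['|'] = true) :
    PySem.Chars.startswith s ['+'] = false := by
  rcases (pv_startswith_single s '|').1 h with ⟨t, rfl⟩
  simp [PySem.Chars.startswith, List.isPrefixOf]

theorem pv_clash' (s : List Char) (h : PySem.Chars.startswith s ['+'] = true) :
    PySem.Chars.startswith s ['|'] = false := by
  rcases (pv_startswith_single s '+').1 h with ⟨t, rfl⟩
  simp [PySem.Chars.startswith, List.isPrefixOf]

theorem pv_cells_eq : pvA_cells = pvB_cells := rfl

-- pvB_run only moves forward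
theorem pvB_run_le (lines : List String) (j : Int) (acc : List (List Char)) :
    j ≤ (pvB_run lines j acc).2 := by
  fun_induction pvB_run with
  | case1 j acc h hp ih => omega
  | case2 j acc h hp => simp
  | case3 j acc h => simp

-- A's index-assignment merge loop is B's zipWith merge
theorem pv_mergeFor_general (cur cells : List (List Char)) (j : Nat) :
    pvA_mergeFor cur cells j = cur.take j ++ pvB_mergeRow (cur.drop j) (cells.drop j) := by
  fun_induction pvA_mergeFor with
  | case2 cur j h =>
      have h2 : cur.length ≤ j ∨ cells.length ≤ j := by omega
      rcases h2 with hc | hc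
      · rw [List.drop_eq_nil_of_le hc, List.take_of_length_le hc]
        simp [pvB_mergeRow]
      · rw [List.drop_eq_nil_of_le hc]
        simp [pvB_mergeRow, List.take_append_drop]
  | case1 cur j h ih =>
      have hcu : j < cur.length := by omega
      have hce : j < cells.length := by omega
      rw [ih]
      rw [List.drop_eq_getElem_cons hcu, List.drop_eq_getElem_cons hce]
      rw [List.set_eq_take_append_cons_drop, if_pos hcu]
      simp only [List.take_append, List.drop_append, List.length_take]
      have hnil : List.drop (j+1) (List.take j cur) = [] :=
        List.drop_eq_nil_of_le (by simp [List.length_take])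
      simp [pvB_mergeRow, hcu, hce, Nat.min_eq_left (Nat.le_of_lt hcu), List.take_add_one,
        hnil, List.drop_drop, List.take_take]
      rw [show j + (cells.length - j) = cells.length from by omega,
        List.drop_eq_getElem_cons hcu, List.drop_eq_getElem_cons hce, List.zipWith_cons_cons,
        List.cons_append]

theorem pv_mergeFor_eq_mergeRow (cur cells : List (List Char)) :
    pvA_mergeFor cur cells 0 = pvB_mergeRow cur cells := by
  simpa using pv_mergeFor_general cur cells 0

-- accumulator form of pvB_run
theorem pvB_run_acc (lines : List String) (j : Int) (acc : List (List Char)) :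
    pvB_run lines j acc = (acc ++ (pvB_run lines j []).1, (pvB_run lines j []).2) := by
  rw [pvB_run]
  conv_rhs => rw [pvB_run]
  by_cases h : j < (lines.length : Int)
  · simp only [h, dif_pos]
    by_cases hp : PySem.Chars.startswith (PySem.Chars.strip (pvLine lines j)) ['|'] = true
    · simp only [hp, if_pos]
      rw [pvB_run_acc lines (j+1) (acc ++ [PySem.Chars.strip (pvLine lines j)]),
          pvB_run_acc lines (j+1) ([] ++ [PySem.Chars.strip (pvLine lines j)])]
      simp
    · simp [hp]
  · simp [h]
termination_by ((lines.length : Int) - j).toNat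
decreasing_by all_goals omega

-- A's loop in mid-run state, expressed through B's run scanner
theorem pv_run_lemma (lines : List String) (j : Int) (cur : List (List Char))
    (rows : List (List String)) :
    pvA_loop lines j rows (some cur) =
      (if ((pvB_run lines j []).2 < (lines.length : Int) ∧
            PySem.Chars.startswith (PySem.Chars.strip (pvLine lines (pvB_run lines j []).2)) ['+'] = true) then
        (if (lines.length : Int) ≤ (pvB_run lines j []).2 + 1 ∨
            ¬ PySem.Chars.startswith (PySem.Chars.lstrip (pvLine lines ((pvB_run lines j []).2 + 1))) ['|'] = true then
          rows ++ [((pvB_run lines j []).1.foldl (fun c t => pvB_mergeRow c (pvB_cells t)) cur).map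
            (fun c => String.ofList (PySem.Chars.strip c))]
        else
          pvA_loop lines ((pvB_run lines j []).2 + 1)
            (rows ++ [((pvB_run lines j []).1.foldl (fun c t => pvB_mergeRow c (pvB_cells t)) cur).map
              (fun c => String.ofList (PySem.Chars.strip c))]) none)
      else rows) := by
  rw [pvA_loop]
  by_cases h : j < (lines.length : Int)
  · by_cases hplus : PySem.Chars.startswith (PySem.Chars.strip (pvLine lines j)) ['+'] = true
    · have hp : PySem.Chars.startswith (PySem.Chars.strip (pvLine lines j)) ['|'] = false :=
        pv_clash' _ hplus
      have hrun : pvB_run lines j [] = ([], j) := by rw [pvB_run]; simp [h, hp]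
      simp [h, hplus, hrun]
    · by_cases hpipe : PySem.Chars.startswith (PySem.Chars.strip (pvLine lines j)) ['|'] = true
      · have hrun : pvB_run lines j [] =
            ([PySem.Chars.strip (pvLine lines j)] ++ (pvB_run lines (j+1) []).1,
             (pvB_run lines (j+1) []).2) := by
          rw [pvB_run]
          simp only [h, dif_pos, hpipe, if_pos]
          exact pvB_run_acc lines (j+1) ([] ++ [PySem.Chars.strip (pvLine lines j)])
        simp only [h, dif_pos, hplus, Bool.false_eq_true, if_false, hpipe, if_pos]
        rw [pv_cells_eq, pv_mergeFor_eq_mergeRow]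
        rw [pv_run_lemma lines (j+1) (pvB_mergeRow cur (pvB_cells (PySem.Chars.strip (pvLine lines j)))) rows]
        rw [hrun]
        simp
      · have hrun : pvB_run lines j [] = ([], j) := by rw [pvB_run]; simp [h, hpipe]
        simp [h, hplus, hpipe, hrun]
  · have hrun : pvB_run lines j [] = ([], j) := by rw [pvB_run]; simp [h]
    simp [h, hrun]
termination_by ((lines.length : Int) - j).toNat
decreasing_by all_goals omega

-- main simulation: from a rule line, A's flat loop equals B's run loop
theorem pv_main_lemma (lines : List String) (i : Int) (rows : List (List String))
    (hi : i < (lines.length : Int))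
    (hplus : PySem.Chars.startswith (PySem.Chars.strip (pvLine lines i)) ['+'] = true) :
    pvA_loop lines i rows none = pvB_runs lines i rows := by
  rw [pvA_loop, pvB_runs]
  by_cases hg : (lines.length : Int) ≤ i + 1 ∨
      ¬ PySem.Chars.startswith (PySem.Chars.lstrip (pvLine lines (i + 1))) ['|'] = true
  · rcases hg with hg1 | hg1
    · simp [hi, hplus, hg1]
    · simp only [Bool.not_eq_true] at hg1; simp [hi, hplus, hg1]
  · push_neg at hg
    obtain ⟨hi1, hpipe1⟩ := hg
    have hpipe1' : PySem.Chars.startswith (PySem.Chars.strip (pvLine lines (i+1))) ['|'] = true := by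
      rw [pv_startswith_strip_eq_lstrip]; simpa using hpipe1
    have hplus1 : PySem.Chars.startswith (PySem.Chars.strip (pvLine lines (i+1))) ['+'] = false :=
      pv_clash _ hpipe1'
    have hguard : ¬ ((lines.length : Int) ≤ i + 1 ∨
        ¬ PySem.Chars.startswith (PySem.Chars.lstrip (pvLine lines (i + 1))) ['|'] = true) := by
      push_neg
      exact ⟨hi1, by simpa using hpipe1⟩
    simp only [hi, dif_pos, hplus, if_pos, hguard, if_neg, not_false_eq_true]
    -- A takes one step onto the first cell line
    rw [pvA_loop]
    simp only [hi1, dif_pos, hplus1, Bool.false_eq_true, if_false, hpipe1', if_pos]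
    rw [pv_cells_eq]
    rw [show i + 1 + 1 = i + 2 from by ring]
    rw [pv_run_lemma lines (i+2) (pvB_cells (PySem.Chars.strip (pvLine lines (i+1)))) rows]
    -- name the run result
    set g := (pvB_run lines (i+2) []).1 with hgdef
    set k := (pvB_run lines (i+2) []).2 with hkdef
    have hk2' : i + 2 ≤ k := by rw [hkdef]; exact pvB_run_le lines (i+2) []
    by_cases hcond : k < (lines.length : Int) ∧
        PySem.Chars.startswith (PySem.Chars.strip (pvLine lines k)) ['+'] = true
    · simp only [hcond, if_pos, and_true, hk2', true_and]
      have hrow : (g.foldl (fun c t => pvB_mergeRow c (pvB_cells t))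
            (pvB_cells (PySem.Chars.strip (pvLine lines (i+1))))).map
            (fun c => String.ofList (PySem.Chars.strip c))
          = pvB_rowOf (PySem.Chars.strip (pvLine lines (i+1))) g := rfl
      rw [hrow]
      -- A continues at k+1 after the flush iff the guard at k fails; fold that back into pvA_loop at k
      have hstep : (if (lines.length : Int) ≤ k + 1 ∨
            ¬ PySem.Chars.startswith (PySem.Chars.lstrip (pvLine lines (k + 1))) ['|'] = true then
            rows ++ [pvB_rowOf (PySem.Chars.strip (pvLine lines (i+1))) g]
          else pvA_loop lines (k + 1) (rows ++ [pvB_rowOf (PySem.Chars.strip (pvLine lines (i+1))) g]) none)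
          = pvA_loop lines k (rows ++ [pvB_rowOf (PySem.Chars.strip (pvLine lines (i+1))) g]) none := by
        conv_rhs => rw [pvA_loop]
        simp [hcond.1, hcond.2]
      rw [hstep]
      rw [pv_main_lemma lines k (rows ++ [pvB_rowOf (PySem.Chars.strip (pvLine lines (i+1))) g]) hcond.1 hcond.2]
      simp [hcond, hk2']
    · simp [hcond, hk2']
  termination_by ((lines.length : Int) - i).toNat
  decreasing_by
    have := pvB_run_le lines (i + 2) []
    omega

theorem pv_skip_eq (lines : List String) (i : Int) : pvA_skip lines i = pvB_skip lines i := by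
  fun_induction pvA_skip with
  | case1 i h hs ih => rw [pvB_skip]; simp [h, hs, ih]
  | case2 i h hs => rw [pvB_skip]; simp [h, hs]
  | case3 i h => rw [pvB_skip]; simp [h]

-- ===== VERDICT (by name: the statement is the Claim_ definition above) =====
theorem read_rst_grid_table_py_spec : Claim_equal_read_rst_grid_table_py := by
  intro lines start _hdom _hpre
  unfold Spec_read_rst_grid_table_py
  unfold read_rst_grid_table_py read_rst_grid_table_py_alt
  rw [← pv_skip_eq]
  by_cases hg : (lines.length : Int) ≤ pvA_skip lines start ∨
      ¬ PySem.Chars.startswith (PySem.Chars.lstrip (pvLine lines (pvA_skip lines start))) ['+'] = true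
  · simp only [hg, if_pos]
  · simp only [hg, if_neg, not_false_eq_true]
    push_neg at hg
    exact pv_main_lemma lines _ [] hg.1
      (by rw [pv_startswith_strip_eq_lstrip]; simpa using hg.2)
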